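-- pv_equiv track=rewrite | github.com/stankv/Studing | Clear_Code/Comments.py | PrintingCosts
-- ===== SOURCE A (Python) =====
-- def PrintingCosts(Line):
--     TableSymbols = {" ": 0, "!": 9, "\"": 6, "#": 24, "$": 29, "%": 22, "&": 24, "\'": 3, "(": 12, ")": 12, "*": 17, "+": 13,
--                    ",": 7, "-": 7, ".": 4, "/": 10, "0": 22, "1": 19, "2": 22, "3": 23, "4": 21, "5": 27, "6": 26, "7": 16,
--                    "8": 23, "9": 26, ":": 8, ";": 11, "<": 10, "=": 14, ">": 10, "?": 15, "@": 32, "A": 24, "B": 29, "C": 20,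
--                    "D": 26, "E": 26, "F": 20, "G": 25, "H": 25, "I": 18, "J": 18, "K": 21, "L": 16, "M": 28, "N": 25, "O": 26,
--                    "P": 23, "Q": 31, "R": 28, "S": 25, "T": 16, "U": 23, "V": 19, "W": 26, "X": 18, "Y": 14, "Z": 22, "[": 18,
--                    "\\": 10, "]": 18, "^": 7, "_": 8, "`": 3, "a": 23, "b": 25, "c": 17, "d": 25, "e": 23, "f": 18, "g": 30,
--                    "h": 21, "i": 15, "j": 20, "k": 21, "l": 16, "m": 22, "n": 18, "o": 20, "p": 25, "q": 25, "r": 13, "s": 21,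
--                    "t": 17, "u": 17, "v": 13, "w": 19, "x": 13, "y": 24, "z": 19, "{": 18, "|": 12, "}": 18, "~": 9}
--     result = 0
--     for symbol in Line:
--         result += TableSymbols.get(symbol, 23)    # если символа нет в таблице, то расход тонера = 23
--     return result
-- ===== SOURCE B (Python) =====
-- def PrintingCosts(Line):
--     # toner cost of chr(32 + i); any other character costs 23
--     COSTS = (0, 9, 6, 24, 29, 22, 24, 3, 12, 12, 17, 13,
--              7, 7, 4, 10, 22, 19, 22, 23, 21, 27, 26, 16,
--              23, 26, 8, 11, 10, 14, 10, 15, 32, 24, 29, 20,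
--              26, 26, 20, 25, 25, 18, 18, 21, 16, 28, 25, 26,
--              23, 31, 28, 25, 16, 23, 19, 26, 18, 14, 22, 18,
--              10, 18, 7, 8, 3, 23, 25, 17, 25, 23, 18, 30,
--              21, 15, 20, 21, 16, 22, 18, 20, 25, 25, 13, 21,
--              17, 17, 13, 19, 13, 24, 19, 18, 12, 18, 9)
--     counts = {}
--     for ch in Line:
--         counts[ch] = counts.get(ch, 0) + 1
--     total = 0
--     for ch, n in counts.items():
--         o = ord(ch)
--         total += n * (COSTS[o - 32] if 32 <= o < 127 else 23)
--     return total
-- ===== Notes on version B (the rewrite author's own statement) =====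
-- stated objective: alternative
-- what changed: B builds a character-frequency dict in one pass and then sums count*cost over the distinct characters, with the costs held in a tuple indexed by character code instead of a char-keyed dict.
import Mathlib
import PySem

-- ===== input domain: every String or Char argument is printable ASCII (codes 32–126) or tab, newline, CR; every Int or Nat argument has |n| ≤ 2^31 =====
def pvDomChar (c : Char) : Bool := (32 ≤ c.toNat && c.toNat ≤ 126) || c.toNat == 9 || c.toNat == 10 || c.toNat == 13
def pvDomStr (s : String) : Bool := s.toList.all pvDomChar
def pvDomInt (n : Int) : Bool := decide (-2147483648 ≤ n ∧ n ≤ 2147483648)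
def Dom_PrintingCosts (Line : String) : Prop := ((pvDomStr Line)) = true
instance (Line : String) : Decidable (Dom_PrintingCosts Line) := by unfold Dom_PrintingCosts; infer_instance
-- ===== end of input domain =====

-- B replaces A's per-character accumulation over a char-keyed cost dict by a frequency-count
-- pass followed by a count*cost sum over the distinct characters, costs in a code-indexed list
-- (objective: alternative decomposition, not faster).

-- ===== PORT A =====
-- A's TableSymbols dict literal
def pvTableSymbols : PySem.Dict Char Int := PySem.Dict.ofList [
  (' ', 0), ('!', 9), ('\"', 6), ('#', 24), ('$', 29), ('%', 22),
  ('&', 24), ('\'', 3), ('(', 12), (')', 12), ('*', 17), ('+', 13),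
  (',', 7), ('-', 7), ('.', 4), ('/', 10), ('0', 22), ('1', 19),
  ('2', 22), ('3', 23), ('4', 21), ('5', 27), ('6', 26), ('7', 16),
  ('8', 23), ('9', 26), (':', 8), (';', 11), ('<', 10), ('=', 14),
  ('>', 10), ('?', 15), ('@', 32), ('A', 24), ('B', 29), ('C', 20),
  ('D', 26), ('E', 26), ('F', 20), ('G', 25), ('H', 25), ('I', 18),
  ('J', 18), ('K', 21), ('L', 16), ('M', 28), ('N', 25), ('O', 26),
  ('P', 23), ('Q', 31), ('R', 28), ('S', 25), ('T', 16), ('U', 23),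
  ('V', 19), ('W', 26), ('X', 18), ('Y', 14), ('Z', 22), ('[', 18),
  ('\\', 10), (']', 18), ('^', 7), ('_', 8), ('`', 3), ('a', 23),
  ('b', 25), ('c', 17), ('d', 25), ('e', 23), ('f', 18), ('g', 30),
  ('h', 21), ('i', 15), ('j', 20), ('k', 21), ('l', 16), ('m', 22),
  ('n', 18), ('o', 20), ('p', 25), ('q', 25), ('r', 13), ('s', 21),
  ('t', 17), ('u', 17), ('v', 13), ('w', 19), ('x', 13), ('y', 24),
  ('z', 19), ('{', 18), ('|', 12), ('}', 18), ('~', 9)]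

-- result = 0; for symbol in Line: result += TableSymbols.get(symbol, 23); return result
def PrintingCosts (Line : String) : Int :=
  Line.toList.foldl (fun result symbol => result + pvTableSymbols.getD symbol 23) 0

-- ===== PORT B =====
-- B's COSTS tuple: toner cost of chr(32 + i)
def pvCosts : List Int :=
  [0, 9, 6, 24, 29, 22, 24, 3, 12, 12, 17, 13,
   7, 7, 4, 10, 22, 19, 22, 23, 21, 27, 26, 16,
   23, 26, 8, 11, 10, 14, 10, 15, 32, 24, 29, 20,
   26, 26, 20, 25, 25, 18, 18, 21, 16, 28, 25, 26,
   23, 31, 28, 25, 16, 23, 19, 26, 18, 14, 22, 18,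
   10, 18, 7, 8, 3, 23, 25, 17, 25, 23, 18, 30,
   21, 15, 20, 21, 16, 22, 18, 20, 25, 25, 13, 21,
   17, 17, 13, 19, 13, 24, 19, 18, 12, 18, 9]

-- n * (COSTS[o - 32] if 32 <= o < 127 else 23) for one item (ch, n) of counts
def pvWeighted (p : Char × Int) : Int :=
  let o : Int := p.1.toNat
  p.2 * (if 32 ≤ o ∧ o < 127 then PySem.List.pyGetD pvCosts (o - 32) 23 else 23)

def PrintingCosts_alt (Line : String) : Int :=
  -- counts = {}; for ch in Line: counts[ch] = counts.get(ch, 0) + 1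
  let counts : PySem.Dict Char Int :=
    Line.toList.foldl (fun d ch => d.insert ch (d.getD ch 0 + 1)) PySem.Dict.empty
  -- total = 0; for ch, n in counts.items(): total += n * (...)
  counts.items.foldl (fun total p => total + pvWeighted p) 0

-- ===== PRECONDITION & SPEC =====
def Spec_PrintingCosts (Line : String) (out : Int) : Prop := out = PrintingCosts_alt Line
instance (Line : String) (out : Int) : Decidable (Spec_PrintingCosts Line out) := by unfold Spec_PrintingCosts; infer_instance

-- ===== CLAIM (what is proved, stated in full; the proofs are below) =====
def Claim_equal_PrintingCosts : Prop := ∀ (Line : String), Dom_PrintingCosts Line → Spec_PrintingCosts Line (PrintingCosts Line)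

-- ===== LEMMAS AND PROOFS =====

-- per-character agreement of the two cost tables, on characters below 128
set_option maxRecDepth 8192 in
theorem pv_cost_eq_of_lt (c : Char) (h : c.toNat < 128) :
    pvTableSymbols.getD c 23 = pvWeighted (c, 1) := by
  have key : ∀ n : Nat, n < 128 →
      pvTableSymbols.getD (Char.ofNat n) 23 = pvWeighted (Char.ofNat n, 1) := by decide
  have := key c.toNat h
  rwa [Char.ofNat_toNat] at this

-- a per-element sum equals the count-weighted sum over the distinct elements
theorem pv_sum_eq_weighted (l : List Char) (f : Char → Int) :
    (l.map f).sum = ((PySem.Set.ofList l).map (fun k => (l.count k : Int) * f k)).sum := by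
  rw [Finset.sum_list_map_count l f,
      ← List.sum_toFinset _ (PySem.Set.nodup_ofList l)]
  have hfin : (PySem.Set.ofList l).toFinset = l.toFinset := by
    ext x
    simp [List.mem_toFinset, PySem.Set.mem_ofList]
  rw [hfin]
  apply Finset.sum_congr rfl
  intro x _
  simp

-- ===== VERDICT (by name: the statement is the Claim_ definition above) =====
set_option maxRecDepth 8192 in
theorem PrintingCosts_spec : Claim_equal_PrintingCosts := by
  intro Line hdom
  simp only [Spec_PrintingCosts, PrintingCosts, PrintingCosts_alt]
  rw [PySem.Dict.foldl_insert_getD_add_one_eq_counter, PySem.Dict.items_counter]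
  rw [PySem.List.foldl_add, PySem.List.foldl_add, List.map_map]
  have hA : (Line.toList.map (fun symbol => pvTableSymbols.getD symbol 23)).sum
      = ((PySem.Set.ofList Line.toList).map
          (fun k => (Line.toList.count k : Int) * pvTableSymbols.getD k 23)).sum :=
    pv_sum_eq_weighted Line.toList (fun symbol => pvTableSymbols.getD symbol 23)
  rw [zero_add, zero_add, hA]
  congr 1
  apply List.map_congr_left
  intro c hc
  have hcl : c ∈ Line.toList := (PySem.Set.mem_ofList _ _).1 hc
  have hdc : pvDomChar c = true := by
    have := List.all_eq_true.1 hdom c hcl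
    simpa using this
  have hlt : c.toNat < 128 := by
    simp [pvDomChar] at hdc
    omega
  have := pv_cost_eq_of_lt c hlt
  simp only [Function.comp]
  rw [this]
  simp [pvWeighted]
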